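-- pv_equiv track=rewrite | github.com/dan1229/obsidian-google-cal-sync | simply.py | remove_calendar_section
-- ===== SOURCE A (Python) =====
-- def remove_calendar_section(content):
--     """
--     Remove an existing calendar section from note content.
--     Returns (cleaned_content, removed_section_count).
--     """
--     lines = content.splitlines()
--     new_lines = []
--     in_calendar_section = False
--     removed_sections = 0
--
--     for line in lines:
--         # Look for a header that has "calendar" in it
--         if (
--             line.strip().lower().startswith(("#", "##", "###"))
--             and "calendar" in line.lower()
--         ):
--             in_calendar_section = True
--             removed_sections += 1
--             continue
--
--         if in_calendar_section:
--             # Stop skipping lines if we reach another header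
--             if line.strip().startswith(("#", "##", "###")):
--                 in_calendar_section = False
--                 new_lines.append(line)
--         else:
--             new_lines.append(line)
--
--     return "\n".join(new_lines), removed_sections
-- ===== SOURCE B (Python) =====
-- def _split_sections(lines):
--     """Partition lines into (preamble, sections); each section = a header line
--     (strip() starts with '#') plus the body lines up to the next header."""
--     pre, secs = [], []
--     cur = None
--     for line in lines:
--         if line.strip().startswith('#'):
--             cur = [line]
--             secs.append(cur)
--         elif cur is None:
--             pre.append(line)
--         else:
--             cur.append(line)
--     return pre, secs
--
--
-- def remove_calendar_section(content):
--     """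
--     Remove an existing calendar section from note content.
--     Returns (cleaned_content, removed_section_count).
--     """
--     pre, secs = _split_sections(content.splitlines())
--     kept = list(pre)
--     removed = 0
--     for sec in secs:
--         if 'calendar' in sec[0].lower():
--             removed += 1
--         else:
--             kept.extend(sec)
--     return "\n".join(kept), removed
-- ===== Notes on version B (the rewrite author's own statement) =====
-- stated objective: alternative
-- what changed: Replaced A's single-pass boolean-flag scan (in_calendar_section state toggled per line) by a group-then-filter decomposition: first partition the lines into a preamble plus header-led sections, then keep the preamble and every section whose header does not mention 'calendar', counting the dropped ones.
import Mathlib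
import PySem

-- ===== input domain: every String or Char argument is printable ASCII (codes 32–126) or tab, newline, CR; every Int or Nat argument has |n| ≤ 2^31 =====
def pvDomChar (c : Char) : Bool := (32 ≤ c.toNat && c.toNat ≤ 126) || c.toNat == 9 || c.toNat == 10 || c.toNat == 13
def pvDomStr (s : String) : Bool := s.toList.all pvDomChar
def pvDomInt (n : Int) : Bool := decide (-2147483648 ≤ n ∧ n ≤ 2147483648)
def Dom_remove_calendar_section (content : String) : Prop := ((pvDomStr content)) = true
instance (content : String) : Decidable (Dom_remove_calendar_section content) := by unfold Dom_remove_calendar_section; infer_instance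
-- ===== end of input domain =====

-- B replaces A's boolean-flag running scan by a group-then-filter decomposition
-- (partition the lines into a preamble and header-led sections, then drop whole
-- calendar-headed sections); same cost, objective: alternative decomposition.

-- ===== PORT A =====
-- the for-loop with state (new_lines, in_calendar_section, removed_sections), as structural recursion
def removeCalLoopA : List String → List String → Bool → Int → List String × Int
  | [], newLines, _, removed => (newLines, removed)
  | line :: rest, newLines, inCal, removed =>
    if (PySem.Str.startswith (PySem.Str.lower (PySem.Str.strip line)) "#"
        || PySem.Str.startswith (PySem.Str.lower (PySem.Str.strip line)) "##"
        || PySem.Str.startswith (PySem.Str.lower (PySem.Str.strip line)) "###")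
        && PySem.Str.isIn "calendar" (PySem.Str.lower line) then
      removeCalLoopA rest newLines true (removed + 1)
    else if inCal then
      if PySem.Str.startswith (PySem.Str.strip line) "#"
         || PySem.Str.startswith (PySem.Str.strip line) "##"
         || PySem.Str.startswith (PySem.Str.strip line) "###" then
        removeCalLoopA rest (newLines ++ [line]) false removed
      else
        removeCalLoopA rest newLines inCal removed
    else
      removeCalLoopA rest (newLines ++ [line]) inCal removed

def remove_calendar_section (content : String) : String × Int :=
  let lines := PySem.Str.splitlines content
  let st := removeCalLoopA lines [] false 0
  (PySem.Str.join "\n" st.1, st.2)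

-- ===== PORT B =====
-- _split_sections' for-loop, state (pre, secs, cur); in Python `cur` aliases the last
-- element of `secs`, ported by carrying the open section separately and committing it
-- into secs when it closes (at the next header or at the end of the lines)
def splitSecLoop : List String → List String → List (List String) → Option (List String) → List String × List (List String)
  | [], pre, secs, none => (pre, secs)
  | [], pre, secs, some cur => (pre, secs ++ [cur])
  | line :: rest, pre, secs, cur =>
    if PySem.Str.startswith (PySem.Str.strip line) "#" then
      match cur with
      | none => splitSecLoop rest pre secs (some [line])
      | some c => splitSecLoop rest pre (secs ++ [c]) (some [line])
    else
      match cur with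
      | none => splitSecLoop rest (pre ++ [line]) secs none
      | some c => splitSecLoop rest pre secs (some (c ++ [line]))

def filterSecsB : List (List String) → List String → Int → List String × Int
  | [], kept, removed => (kept, removed)
  | sec :: rest, kept, removed =>
    if PySem.Str.isIn "calendar" (PySem.Str.lower (sec.headD "")) then
      filterSecsB rest kept (removed + 1)
    else
      filterSecsB rest (kept ++ sec) removed

def remove_calendar_section_alt (content : String) : String × Int :=
  let ps := splitSecLoop (PySem.Str.splitlines content) [] [] none
  let st := filterSecsB ps.2 ps.1 0
  (PySem.Str.join "\n" st.1, st.2)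

-- ===== PRECONDITION & SPEC =====
def Spec_remove_calendar_section (content : String) (out : String × Int) : Prop := out = remove_calendar_section_alt content
instance (content : String) (out : String × Int) : Decidable (Spec_remove_calendar_section content out) := by unfold Spec_remove_calendar_section; infer_instance

-- ===== CLAIM (what is proved, stated in full; the proofs are below) =====
def Claim_equal_remove_calendar_section : Prop := ∀ (content : String), Dom_remove_calendar_section content → Spec_remove_calendar_section content (remove_calendar_section content)

-- ===== LEMMAS AND PROOFS =====

-- proof-side characterisation of the grouping pass: structural recursion over the lines
def splitSectionsB : List String → List String × List (List String)
  | [] => ([], [])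
  | head :: tail =>
    let ps := splitSectionsB tail
    if PySem.Str.startswith (PySem.Str.strip head) "#" then
      ([], (head :: ps.1) :: ps.2)
    else (head :: ps.1, ps.2)

-- the iterative grouping loop computes splitSectionsB, for both states of `cur`
theorem pv_split (lines : List String) : ∀ (pre : List String) (secs : List (List String)),
    (splitSecLoop lines pre secs none
      = (pre ++ (splitSectionsB lines).1, secs ++ (splitSectionsB lines).2))
    ∧ ∀ c, splitSecLoop lines pre secs (some c)
      = (pre, secs ++ (c ++ (splitSectionsB lines).1) :: (splitSectionsB lines).2) := by
  induction lines with
  | nil =>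
    intro pre secs
    simp [splitSecLoop, splitSectionsB]
  | cons l ls ih =>
    intro pre secs
    simp only [splitSecLoop, splitSectionsB]
    by_cases hH : PySem.Str.startswith (PySem.Str.strip l) "#" = true
    · simp only [hH, if_true]
      constructor
      · rw [(ih pre secs).2 [l]]
        simp
      · intro c
        rw [(ih pre (secs ++ [c])).2 [l]]
        simp
    · simp only [Bool.not_eq_true] at hH
      simp only [hH]
      constructor
      · rw [(ih (pre ++ [l]) secs).1]
        simp
      · intro c
        rw [(ih pre secs).2 (c ++ [l])]
        simp


-- lowering a character yields '#' exactly when the character is '#'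
theorem pv_lowerChar_eq_hash (c : Char) : (PySem.Chars.lowerChar c = '#') ↔ c = '#' := by
  simp only [PySem.Chars.lowerChar, PySem.Chars.isupper]
  split
  · rename_i h
    simp only [Bool.and_eq_true, decide_eq_true_eq] at h
    obtain ⟨h1, h2⟩ := h
    have hA : 65 ≤ c.toNat := h1
    have hZ : c.toNat ≤ 90 := h2
    constructor
    · intro hc
      have h3 := congrArg Char.toNat hc
      rw [Char.toNat_ofNat, if_pos (Or.inl (by omega))] at h3
      have : ('#').toNat = 35 := by decide
      omega
    · intro hc
      subst hc
      revert hA; decide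
  · simp

-- startswith '#' is invariant under lowercasing
theorem pv_sw_lower_hash (t : List Char) :
    PySem.Chars.startswith (PySem.Chars.lower t) ['#'] = PySem.Chars.startswith t ['#'] := by
  cases t with
  | nil => rfl
  | cons c cs =>
    simp [PySem.Chars.lower, PySem.Chars.startswith, List.isPrefixOf]
    exact ⟨fun h => ((pv_lowerChar_eq_hash c).1 h.symm).symm,
           fun h => ((pv_lowerChar_eq_hash c).2 h.symm).symm⟩

-- startswith("##"/"###") implies startswith("#"): the three-way or collapses
theorem pv_sw_triple (t : List Char) :
    (PySem.Chars.startswith t ['#'] || PySem.Chars.startswith t ['#', '#']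
      || PySem.Chars.startswith t ['#', '#', '#']) = PySem.Chars.startswith t ['#'] := by
  cases h : PySem.Chars.startswith t ['#'] with
  | true => simp
  | false =>
    have imp : ∀ p : List Char, ['#'] <+: p →
        PySem.Chars.startswith t p = true → False := by
      intro p hp hsw
      have h1 : ['#'] <+: t := List.IsPrefix.trans hp ((PySem.Chars.startswith_iff _ _).mp hsw)
      rw [← PySem.Chars.startswith_iff] at h1
      rw [h1] at h
      simp at h
    have h2 : PySem.Chars.startswith t ['#', '#'] = false := by
      cases hx : PySem.Chars.startswith t ['#', '#'] with
      | false => rfl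
      | true => exact absurd (imp _ (by decide) hx) not_false
    have h3 : PySem.Chars.startswith t ['#', '#', '#'] = false := by
      cases hx : PySem.Chars.startswith t ['#', '#', '#'] with
      | false => rfl
      | true => exact absurd (imp _ (by decide) hx) not_false
    rw [h2, h3]
    rfl

-- A's first header test (on the lowered, stripped line) equals B's header test
theorem pv_condA1 (s : String) :
    (PySem.Str.startswith (PySem.Str.lower (PySem.Str.strip s)) "#"
      || PySem.Str.startswith (PySem.Str.lower (PySem.Str.strip s)) "##"
      || PySem.Str.startswith (PySem.Str.lower (PySem.Str.strip s)) "###")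
    = PySem.Str.startswith (PySem.Str.strip s) "#" := by
  simp only [PySem.Str.startswith]
  have hb : (PySem.Str.lower (PySem.Str.strip s)).toList
      = PySem.Chars.lower (PySem.Str.strip s).toList := by
    simp [PySem.Str.lower]
  rw [hb]
  have h1 : "#".toList = ['#'] := by decide
  have h2 : "##".toList = ['#', '#'] := by decide
  have h3 : "###".toList = ['#', '#', '#'] := by decide
  rw [h1, h2, h3, pv_sw_triple, pv_sw_lower_hash]

-- A's second header test (on the stripped line) equals B's header test
theorem pv_condA2 (s : String) :
    (PySem.Str.startswith (PySem.Str.strip s) "#"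
      || PySem.Str.startswith (PySem.Str.strip s) "##"
      || PySem.Str.startswith (PySem.Str.strip s) "###")
    = PySem.Str.startswith (PySem.Str.strip s) "#" := by
  simp only [PySem.Str.startswith]
  have h1 : "#".toList = ['#'] := by decide
  have h2 : "##".toList = ['#', '#'] := by decide
  have h3 : "###".toList = ['#', '#', '#'] := by decide
  rw [h1, h2, h3, pv_sw_triple]

-- the central invariant: A's flag-scan equals B's group-then-filter, for both flag values
theorem pv_key (lines : List String) : ∀ (acc : List String) (removed : Int),
    (removeCalLoopA lines acc false removed
      = filterSecsB (splitSectionsB lines).2 (acc ++ (splitSectionsB lines).1) removed)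
    ∧ (removeCalLoopA lines acc true removed
      = filterSecsB (splitSectionsB lines).2 acc removed) := by
  induction lines with
  | nil =>
    intro acc removed
    simp [removeCalLoopA, splitSectionsB, filterSecsB]
  | cons l ls ih =>
    intro acc removed
    simp only [removeCalLoopA, splitSectionsB, pv_condA1, pv_condA2]
    by_cases hH : PySem.Str.startswith (PySem.Str.strip l) "#" = true
    · simp only [hH, if_true, Bool.true_and]
      by_cases hC : PySem.Str.isIn "calendar" (PySem.Str.lower l) = true
      · simp only [hC, if_true]
        constructor
        · rw [(ih acc (removed + 1)).2]
          simp only [filterSecsB, List.headD_cons, hC, if_true, List.append_nil]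
        · rw [(ih acc (removed + 1)).2]
          simp only [filterSecsB, List.headD_cons, hC, if_true]
      · simp only [Bool.not_eq_true] at hC
        simp only [hC]
        constructor
        · rw [(ih (acc ++ [l]) removed).1]
          simp only [filterSecsB, List.headD_cons, hC, List.append_nil]
          rw [List.append_assoc]
          rfl
        · rw [(ih (acc ++ [l]) removed).1]
          simp only [filterSecsB, List.headD_cons, hC]
          rw [List.append_assoc]
          rfl
    · simp only [Bool.not_eq_true] at hH
      simp only [hH, Bool.false_and]
      constructor
      · rw [(ih (acc ++ [l]) removed).1]
        simp
      · exact (ih acc removed).2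

-- ===== VERDICT (by name: the statement is the Claim_ definition above) =====
theorem remove_calendar_section_spec : Claim_equal_remove_calendar_section := by
  intro content _
  unfold Spec_remove_calendar_section remove_calendar_section remove_calendar_section_alt
  have hs := (pv_split (PySem.Str.splitlines content) [] []).1
  simp only [List.nil_append] at hs
  have h := (pv_key (PySem.Str.splitlines content) [] 0).1
  simp only [List.nil_append] at h
  dsimp only
  rw [hs, ← Prod.mk.eta (p := splitSectionsB (PySem.Str.splitlines content)), h]
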